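-- pv_equiv track=rewrite | github.com/scottmm374/My_Advent_solutions | Advent/2022/Day11MonkeyintheMiddle/main.py | check_monkey_three
-- ===== SOURCE A (Python) =====
-- def check_monkey_three(arr_0, arr_1, arr_2, count):
--
--     temp_3 = arr_0
--     temp_1 = arr_1
--     temp_5 = arr_2
--     m_three = count
--
--     while len(temp_3) > 0:
--         m_three +=1
--         item = temp_3.pop(0)
--         new = item + 4
--         # rounded = math.floor(new / 3)
--         if new % 2 == 0:
--             temp_5.append(new)
--         else:
--             temp_1.append(new)
--     return(temp_3, temp_1, temp_5, m_three)
-- ===== SOURCE B (Python) =====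
-- def check_monkey_three(arr_0, arr_1, arr_2, count):
--     count += len(arr_0)
--     odds = [x + 4 for x in arr_0 if (x + 4) % 2 != 0]
--     evens = [x + 4 for x in arr_0 if (x + 4) % 2 == 0]
--     arr_0.clear()
--     arr_1.extend(odds)
--     arr_2.extend(evens)
--     return (arr_0, arr_1, arr_2, count)
-- ===== Notes on version B (the rewrite author's own statement) =====
-- stated objective: faster
-- what changed: Replaces the destructive pop(0)-and-route loop with a closed-form count (count + len) and two parity-filtered comprehensions appended to each bucket, then clears arr_0 in place.
import Mathlib
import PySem

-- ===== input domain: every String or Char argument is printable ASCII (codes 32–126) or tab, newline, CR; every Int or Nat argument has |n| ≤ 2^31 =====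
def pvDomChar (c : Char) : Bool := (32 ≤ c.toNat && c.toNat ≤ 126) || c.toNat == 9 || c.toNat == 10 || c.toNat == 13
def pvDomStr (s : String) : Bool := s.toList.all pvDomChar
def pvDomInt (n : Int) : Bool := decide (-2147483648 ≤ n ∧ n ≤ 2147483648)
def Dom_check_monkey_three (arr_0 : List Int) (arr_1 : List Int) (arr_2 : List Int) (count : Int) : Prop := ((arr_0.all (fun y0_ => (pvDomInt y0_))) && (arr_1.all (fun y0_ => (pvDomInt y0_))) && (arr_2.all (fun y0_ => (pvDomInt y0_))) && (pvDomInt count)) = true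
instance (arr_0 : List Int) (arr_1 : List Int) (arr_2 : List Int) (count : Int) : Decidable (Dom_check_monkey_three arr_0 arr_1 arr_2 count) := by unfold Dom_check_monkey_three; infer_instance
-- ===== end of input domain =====

-- B replaces A's destructive pop(0)-and-route loop by a closed-form count plus two
-- parity-filtered passes, removing the quadratic pop(0) shifting (objective: faster, confirmed). A mutates its list arguments in place;
-- the equivalence proved here is about the RETURN value only (B performs the same mutations).

-- ===== PORT A =====
-- the while loop: state (temp_3, temp_1, temp_5, m_three), pop(0) = head
def checkLoopA : List Int → List Int → List Int → Int → List Int × List Int × List Int × Int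
  | [], temp_1, temp_5, m_three => ([], temp_1, temp_5, m_three)
  | item :: rest, temp_1, temp_5, m_three =>
      if (item + 4) % 2 == 0 then
        checkLoopA rest temp_1 (temp_5 ++ [item + 4]) (m_three + 1)
      else
        checkLoopA rest (temp_1 ++ [item + 4]) temp_5 (m_three + 1)

def check_monkey_three (arr_0 : List Int) (arr_1 : List Int) (arr_2 : List Int) (count : Int) : List Int × List Int × List Int × Int :=
  checkLoopA arr_0 arr_1 arr_2 count

-- ===== PORT B =====
def check_monkey_three_alt (arr_0 : List Int) (arr_1 : List Int) (arr_2 : List Int) (count : Int) : List Int × List Int × List Int × Int :=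
  let count' := count + arr_0.length
  let odds := (arr_0.filter (fun x => (x + 4) % 2 != 0)).map (fun x => x + 4)
  let evens := (arr_0.filter (fun x => (x + 4) % 2 == 0)).map (fun x => x + 4)
  ([], arr_1 ++ odds, arr_2 ++ evens, count')

-- ===== PRECONDITION & SPEC =====
def Spec_check_monkey_three (arr_0 : List Int) (arr_1 : List Int) (arr_2 : List Int) (count : Int) (out : List Int × List Int × List Int × Int) : Prop := out = check_monkey_three_alt arr_0 arr_1 arr_2 count
instance (arr_0 : List Int) (arr_1 : List Int) (arr_2 : List Int) (count : Int) (out : List Int × List Int × List Int × Int) : Decidable (Spec_check_monkey_three arr_0 arr_1 arr_2 count out) := by unfold Spec_check_monkey_three; infer_instance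

-- ===== CLAIM (what is proved, stated in full; the proofs are below) =====
def Claim_equal_check_monkey_three : Prop := ∀ (arr_0 : List Int) (arr_1 : List Int) (arr_2 : List Int) (count : Int), Dom_check_monkey_three arr_0 arr_1 arr_2 count → Spec_check_monkey_three arr_0 arr_1 arr_2 count (check_monkey_three arr_0 arr_1 arr_2 count)

-- ===== LEMMAS AND PROOFS =====
theorem checkLoopA_eq (arr_0 : List Int) :
    ∀ (arr_1 arr_2 : List Int) (count : Int),
      checkLoopA arr_0 arr_1 arr_2 count = check_monkey_three_alt arr_0 arr_1 arr_2 count := by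
  induction arr_0 with
  | nil =>
      intro arr_1 arr_2 count
      simp [checkLoopA, check_monkey_three_alt]
  | cons item rest ih =>
      intro arr_1 arr_2 count
      by_cases h : ((item + 4) % 2 == 0) = true
      · have h0 : (item + 4) % 2 = 0 := by simpa using h
        simp [checkLoopA, h, ih, check_monkey_three_alt, List.filter_cons]
        refine ⟨?_, ?_⟩
        · rw [if_neg (by omega)]
        · push_cast; ring
      · have h0 : (item + 4) % 2 ≠ 0 := by simpa using h
        simp [checkLoopA, h, ih, check_monkey_three_alt, List.filter_cons]
        refine ⟨?_, ?_⟩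
        · rw [if_pos (by omega)]; simp
        · push_cast; ring

-- ===== VERDICT (by name: the statement is the Claim_ definition above) =====
theorem check_monkey_three_spec : Claim_equal_check_monkey_three := by
  intro arr_0 arr_1 arr_2 count _
  unfold Spec_check_monkey_three check_monkey_three
  exact checkLoopA_eq arr_0 arr_1 arr_2 count
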